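-- pv_equiv track=rewrite | github.com/patrick-g-zhang/cFrontEnd | src/FrontEnd.py | pos_word_in_phrase
-- ===== SOURCE A (Python) =====
-- def pos_word_in_phrase(word_index, phrase_map):
--     phrase_index = phrase_map[word_index]
--     phrase_index_list = []
--     for key, value in phrase_map.items():
--         if value == phrase_index:
--             phrase_index_list.append(key)
--     phrase_len = len(phrase_index_list)
--     fw_word_pos = phrase_index_list.index(word_index) + 1
--     bw_word_pos = phrase_len - fw_word_pos + 1
--     return fw_word_pos, bw_word_pos, phrase_index, phrase_len
-- ===== SOURCE B (Python) =====
-- def pos_word_in_phrase(word_index, phrase_map):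
--     # No filtering loop: locate the word's slot with keys.index, then read both
--     # positions off by counting phrase_index occurrences in the values list and
--     # in its prefix slice up to (and including) that slot.
--     phrase_index = phrase_map[word_index]
--     keys = list(phrase_map.keys())
--     values = list(phrase_map.values())
--     phrase_len = values.count(phrase_index)
--     fw_word_pos = values[:keys.index(word_index) + 1].count(phrase_index)
--     bw_word_pos = phrase_len - fw_word_pos + 1
--     return fw_word_pos, bw_word_pos, phrase_index, phrase_len
-- ===== Notes on version B (the rewrite author's own statement) =====
-- stated objective: alternative
-- what changed: B has no filtering loop: it locates the word's slot with keys.index and derives both positions by counting phrase_index occurrences in the values list and in its prefix slice values[:pos+1], instead of A's build-a-filtered-key-list-then-.index scan.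
import Mathlib
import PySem

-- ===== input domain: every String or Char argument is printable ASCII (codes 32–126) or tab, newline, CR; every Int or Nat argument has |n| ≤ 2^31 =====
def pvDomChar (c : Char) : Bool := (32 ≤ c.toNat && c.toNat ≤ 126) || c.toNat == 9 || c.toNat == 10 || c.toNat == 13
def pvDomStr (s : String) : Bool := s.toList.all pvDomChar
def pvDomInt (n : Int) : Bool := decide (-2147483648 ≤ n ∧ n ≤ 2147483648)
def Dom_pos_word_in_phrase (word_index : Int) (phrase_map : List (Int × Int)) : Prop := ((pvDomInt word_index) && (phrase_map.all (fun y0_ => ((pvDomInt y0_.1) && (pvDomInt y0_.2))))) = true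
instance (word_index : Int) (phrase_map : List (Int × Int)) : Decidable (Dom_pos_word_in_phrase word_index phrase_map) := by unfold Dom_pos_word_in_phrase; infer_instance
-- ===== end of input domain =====

-- B replaces A's filtering loop + .index scan by prefix counting: it finds the word's slot
-- with keys.index and counts phrase_index occurrences in the values list and its prefix slice.

-- ===== PORT A =====
def pos_word_in_phrase (word_index : Int) (phrase_map : List (Int × Int)) : Int × Int × Int × Int :=
  let d := PySem.Dict.ofList phrase_map
  let phrase_index := d.getD word_index 0      -- getD 0: the none case (KeyError) is excluded by Pre_
  let phrase_index_list := d.items.foldl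
      (fun acc kv => if kv.2 = phrase_index then acc ++ [kv.1] else acc) ([] : List Int)
  let phrase_len : Int := phrase_index_list.length
  let fw_word_pos : Int :=
      (((PySem.List.index? phrase_index_list word_index).getD 0 : Nat) : Int) + 1
      -- .index: the none case (ValueError) is unreachable under Pre_
  let bw_word_pos := phrase_len - fw_word_pos + 1
  (fw_word_pos, bw_word_pos, phrase_index, phrase_len)

-- ===== PORT B =====
def pos_word_in_phrase_alt (word_index : Int) (phrase_map : List (Int × Int)) : Int × Int × Int × Int :=
  let d := PySem.Dict.ofList phrase_map
  let phrase_index := d.getD word_index 0      -- getD 0: the none case (KeyError) is excluded by Pre_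
  let keys := d.keys
  let values := d.values
  let phrase_len : Int := PySem.List.count values phrase_index
  let pos : Nat := (PySem.List.index? keys word_index).getD 0
      -- keys.index: the none case (ValueError) is unreachable under Pre_
  let fw_word_pos : Int :=
      PySem.List.count (PySem.List.slice values none (some ((pos : Int) + 1))) phrase_index
  let bw_word_pos := phrase_len - fw_word_pos + 1
  (fw_word_pos, bw_word_pos, phrase_index, phrase_len)

-- ===== PRECONDITION & SPEC =====
-- Pre_ excludes exactly the inputs where word_index is not a key of the dict, on which A raises KeyError.
def Pre_pos_word_in_phrase (word_index : Int) (phrase_map : List (Int × Int)) : Prop :=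
  (PySem.Dict.ofList phrase_map).contains word_index = true
instance (word_index : Int) (phrase_map : List (Int × Int)) : Decidable (Pre_pos_word_in_phrase word_index phrase_map) := by unfold Pre_pos_word_in_phrase; infer_instance

def pvWitness_pos_word_in_phrase : Int × (List (Int × Int)) := (0, [(0, 5), (1, 5), (2, 3)])

def Spec_pos_word_in_phrase (word_index : Int) (phrase_map : List (Int × Int)) (out : Int × Int × Int × Int) : Prop := out = pos_word_in_phrase_alt word_index phrase_map
instance (word_index : Int) (phrase_map : List (Int × Int)) (out : Int × Int × Int × Int) : Decidable (Spec_pos_word_in_phrase word_index phrase_map out) := by unfold Spec_pos_word_in_phrase; infer_instance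

-- ===== CLAIM (what is proved, stated in full; the proofs are below) =====
def Claim_equal_pos_word_in_phrase : Prop := ∀ (word_index : Int) (phrase_map : List (Int × Int)), Dom_pos_word_in_phrase word_index phrase_map → Pre_pos_word_in_phrase word_index phrase_map → Spec_pos_word_in_phrase word_index phrase_map (pos_word_in_phrase word_index phrase_map)

-- ===== LEMMAS AND PROOFS =====

-- A's list-building loop produces the keys of the matching items, in order.
lemma foldA_eq (pi : Int) : ∀ (L : List (Int × Int)) (acc : List Int),
    L.foldl (fun acc kv => if kv.2 = pi then acc ++ [kv.1] else acc) acc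
      = acc ++ (L.filter (fun kv => kv.2 == pi)).map Prod.fst := by
  intro L
  induction L with
  | nil => intro acc; simp [List.foldl]
  | cons kv L ih =>
    intro acc
    by_cases h : kv.2 = pi
    · simp [List.foldl, h, ih]
    · simp [List.foldl, h, ih]

-- phrase_len: the filtered list's length is the count of pi among the values.
lemma len_filter_eq_count (pi : Int) (L : List (Int × Int)) :
    ((L.filter (fun kv => kv.2 == pi)).length : Int) = ((L.map Prod.snd).count pi : Nat) := by
  induction L with
  | nil => simp
  | cons kv L ih =>
    by_cases h : kv.2 = pi
    · simp [h, ← ih]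
    · simp [h, ← ih]

-- fw: the 1-based index of word_index in the filtered key list equals the count of pi
-- among the values up to and including word_index's slot (keys must be nodup).
lemma fw_eq_prefix_count (wi pi : Int) : ∀ (L : List (Int × Int)),
    (L.map Prod.fst).Nodup → (wi, pi) ∈ L →
    ∃ pos : Nat, PySem.List.index? (L.map Prod.fst) wi = some pos ∧
      (PySem.List.index? ((L.filter (fun kv => kv.2 == pi)).map Prod.fst) wi).map
          (fun i => (i : Int) + 1)
        = some ((((L.map Prod.snd).take (pos + 1)).count pi : Nat) : Int) := by
  intro L
  induction L with
  | nil => intro _ h; simp at h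
  | cons kv L ih =>
    intro hnd hmem
    have hnd' : (L.map Prod.fst).Nodup := by
      rw [List.map_cons, List.nodup_cons] at hnd; exact hnd.2
    have hhd : kv.1 ∉ L.map Prod.fst := by
      rw [List.map_cons, List.nodup_cons] at hnd; exact hnd.1
    by_cases hk : kv.1 = wi
    · -- head is the word: its value must be pi
      have hv : kv.2 = pi := by
        rcases List.mem_cons.mp hmem with h | h
        · rw [← h]
        · exact absurd (List.mem_map.mpr ⟨(wi, pi), h, rfl⟩) (hk ▸ hhd)
      refine ⟨0, ?_, ?_⟩
      · rw [List.map_cons, hk, PySem.List.index?_cons_self]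
      · rw [List.filter_cons, if_pos (by simp [hv]), List.map_cons, hk,
            PySem.List.index?_cons_self]
        simp [List.take_succ_cons, hv]
    · -- head is not the word: recurse
      have hmem' : (wi, pi) ∈ L := by
        rcases List.mem_cons.mp hmem with h | h
        · exact absurd (by rw [← h]) hk
        · exact h
      obtain ⟨pos, hidx, hfw⟩ := ih hnd' hmem'
      refine ⟨pos + 1, ?_, ?_⟩
      · rw [List.map_cons, PySem.List.index?_cons_of_ne _ hk, hidx]; rfl
      · by_cases hv : kv.2 = pi
        · rw [List.filter_cons, if_pos (by simp [hv]), List.map_cons,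
              PySem.List.index?_cons_of_ne _ hk]
          cases hin : PySem.List.index? ((L.filter (fun kv => kv.2 == pi)).map Prod.fst) wi with
          | none => rw [hin] at hfw; simp at hfw
          | some i =>
            rw [hin] at hfw
            simp at hfw
            simp [hv]
            omega
        · rw [List.filter_cons, if_neg (by simp [hv]), hfw]
          simp [List.take_succ_cons, hv]

lemma nodup_keys_items (pm : List (Int × Int)) :
    ((PySem.Dict.ofList pm).items.map Prod.fst).Nodup := by
  have := PySem.Dict.nodup_keys_ofList (ps := pm) (ν := Int)
  simpa [PySem.Dict.keys] using this

-- ===== VERDICT (by name: the statement is the Claim_ definition above) =====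
theorem pos_word_in_phrase_spec : Claim_equal_pos_word_in_phrase := by
  intro wi pm _ hpre
  unfold Spec_pos_word_in_phrase
  unfold pos_word_in_phrase pos_word_in_phrase_alt
  set d := PySem.Dict.ofList pm with hd
  have hcont : d.contains wi = true := hpre
  obtain ⟨pi, hget⟩ : ∃ pi, d.get? wi = some pi := by
    cases hg : d.get? wi with
    | none => simp [(PySem.Dict.get?_eq_none_iff_contains d wi).mp hg] at hcont
    | some v => exact ⟨v, rfl⟩
  have hgetD : d.getD wi 0 = pi := PySem.Dict.getD_of_get?_eq_some d 0 hget
  have hnd := nodup_keys_items pm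
  have hmem : (wi, pi) ∈ d.items := PySem.Dict.mem_items_of_get?_eq_some d hget
  obtain ⟨pos, hidx, hfw⟩ := fw_eq_prefix_count wi pi d.items hnd hmem
  obtain ⟨i, hin⟩ : ∃ i, PySem.List.index?
      ((d.items.filter (fun kv => kv.2 == pi)).map Prod.fst) wi = some i := by
    cases hg : PySem.List.index? ((d.items.filter (fun kv => kv.2 == pi)).map Prod.fst) wi with
    | none => rw [hg] at hfw; simp at hfw
    | some j => exact ⟨j, rfl⟩
  rw [hin] at hfw
  simp at hfw
  have hkeys : d.keys = d.items.map Prod.fst := rfl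
  have hvals : d.values = d.items.map Prod.snd := rfl
  have hslice : PySem.List.slice (d.items.map Prod.snd) none (some ((pos : Int) + 1))
      = (d.items.map Prod.snd).take (pos + 1) := by
    have h1 : ((pos : Int) + 1) = ((pos + 1 : Nat) : Int) := by push_cast; ring
    rw [h1, PySem.List.slice_to_natCast]
  have hlen := len_filter_eq_count pi d.items
  simp only [hgetD, foldA_eq, List.nil_append, hin, hkeys, hvals, hidx, Option.getD_some,
    hslice, PySem.List.count_eq]
  refine Prod.ext ?_ (Prod.ext ?_ (Prod.ext rfl ?_)) <;> simp <;> push_cast at hfw hlen ⊢ <;> omega
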